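-- pv_equiv track=rewrite | github.com/caseylinden/ChessGame | last_version_b.py | near_enemy_bishop
-- ===== SOURCE A (Python) =====
-- white_pieces = ['rook', 'knight', 'bishop', 'queen', 'king', 'bishop', 'knight', 'rook',
--                 'pawn', 'pawn', 'pawn', 'pawn', 'pawn', 'pawn', 'pawn', 'pawn']
--
-- black_pieces = ['rook', 'knight', 'bishop', 'queen', 'king', 'bishop', 'knight', 'rook',
--                 'pawn', 'pawn', 'pawn', 'pawn', 'pawn', 'pawn', 'pawn', 'pawn']
--
-- black_locations = [(0, 0), (1, 0), (2, 0), (3, 0), (4, 0), (5, 0), (6, 0), (7, 0),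
--                    (0, 1), (1, 1), (2, 1), (3, 1), (4, 1), (5, 1), (6, 1), (7, 1)]
--
-- white_locations = [(0, 7), (1, 7), (2, 7), (3, 7), (4, 7), (5, 7), (6, 7), (7, 7),
--                    (0, 6), (1, 6), (2, 6), (3, 6), (4, 6), (5, 6), (6, 6), (7, 6)]
--
-- def near_enemy_bishop(king_position, color):
--     moves_list = []
--     if color == 'white':
--         allies_locations = white_locations
--         enemies_locations = black_locations
--         enemies_pieces = black_pieces
--     else:
--         allies_locations = black_locations
--         enemies_locations = white_locations
--         enemies_pieces = white_pieces
--
--     for k in range(len(enemies_pieces)):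
--         if enemies_pieces[k] == 'bishop':
--             position = enemies_locations[k]
--             for i in range(4):  # diagonals
--                 if i == 0:  # top-right
--                     for j in range(1, 8):
--                         if (position[0] + j, position[1] - j) not in allies_locations and \
--                                 (position[0] + j) < 8 and (position[1] - j) > -1:
--                             if (position[0] + j, position[1] - j) not in enemies_locations:
--                                 moves_list.append((position[0] + j, position[1] - j))
--                             else:
--                                 moves_list.append((position[0] + j, position[1] - j))
--                                 break
--                         elif (position[0] + j, position[1] - j) in allies_locations:
--                             moves_list.append((position[0] + j, position[1] - j))
--                             break
--                         else:
--                             break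
--                 if i == 1:  # top-left
--                     for j in range(1, 8):
--                         if (position[0] - j, position[1] - j) not in allies_locations and \
--                                 (position[0] - j) > -1 and (position[1] - j) > -1:
--                             if (position[0] - j, position[1] - j) not in enemies_locations:
--                                 moves_list.append((position[0] - j, position[1] - j))
--                             else:
--                                 moves_list.append((position[0] - j, position[1] - j))
--                                 break
--                         elif (position[0] - j, position[1] - j) in allies_locations:
--                             moves_list.append((position[0] - j, position[1] - j))
--                             break
--                         else:
--                             break
--                 if i == 2:  # bottom-right
--                     for j in range(1, 8):
--                         if (position[0] + j, position[1] + j) not in allies_locations and \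
--                                 (position[0] + j) < 8 and (position[1] + j) < 8:
--                             if (position[0] + j, position[1] + j) not in enemies_locations:
--                                 moves_list.append((position[0] + j, position[1] + j))
--                             else:
--                                 moves_list.append((position[0] + j, position[1] + j))
--                                 break
--                         elif (position[0] + j, position[1] + j) in allies_locations:
--                             moves_list.append((position[0] + j, position[1] + j))
--                             break
--                         else:
--                             break
--                 else:  # bottom-left
--                     for j in range(1, 8):
--                         if (position[0] - j, position[1] + j) not in allies_locations and \
--                                 (position[0] - j) > -1 and (position[1] + j) < 8:
--                             if (position[0] - j, position[1] + j) not in enemies_locations: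
--                                 moves_list.append((position[0] - j, position[1] + j))
--                             else:
--                                 moves_list.append((position[0] - j, position[1] + j))
--                                 break
--                         elif (position[0] - j, position[1] + j) in allies_locations:
--                             moves_list.append((position[0] - j, position[1] + j))
--                             break
--                         else:
--                             break
--
--     if king_position in moves_list:
--         return True
--     else:
--         return False
-- ===== SOURCE B (Python) =====
-- white_pieces = ['rook', 'knight', 'bishop', 'queen', 'king', 'bishop', 'knight', 'rook',
--                 'pawn', 'pawn', 'pawn', 'pawn', 'pawn', 'pawn', 'pawn', 'pawn']
--
-- black_pieces = ['rook', 'knight', 'bishop', 'queen', 'king', 'bishop', 'knight', 'rook',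
--                 'pawn', 'pawn', 'pawn', 'pawn', 'pawn', 'pawn', 'pawn', 'pawn']
--
-- black_locations = [(0, 0), (1, 0), (2, 0), (3, 0), (4, 0), (5, 0), (6, 0), (7, 0),
--                    (0, 1), (1, 1), (2, 1), (3, 1), (4, 1), (5, 1), (6, 1), (7, 1)]
--
-- white_locations = [(0, 7), (1, 7), (2, 7), (3, 7), (4, 7), (5, 7), (6, 7), (7, 7),
--                    (0, 6), (1, 6), (2, 6), (3, 6), (4, 6), (5, 6), (6, 6), (7, 6)]
--
--
-- def _bishop_reaches(allies_locations, enemies_locations, enemies_pieces, king_position):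
--     kx, ky = king_position
--     if not (0 <= kx < 8 and 0 <= ky < 8):
--         return False
--     occupied = set(allies_locations + enemies_locations)
--     for k, piece in enumerate(enemies_pieces):
--         if piece != 'bishop':
--             continue
--         bx, by = enemies_locations[k]
--         dx, dy = kx - bx, ky - by
--         if dx == 0 or abs(dx) != abs(dy):
--             continue
--         sx = 1 if dx > 0 else -1
--         sy = 1 if dy > 0 else -1
--         if all((bx + j * sx, by + j * sy) not in occupied for j in range(1, abs(dx))):
--             return True
--     return False
--
--
-- def near_enemy_bishop(king_position, color):
--     if color == 'white':
--         return _bishop_reaches(white_locations, black_locations, black_pieces, king_position)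
--     else:
--         return _bishop_reaches(black_locations, white_locations, white_pieces, king_position)
-- ===== Notes on version B (the rewrite author's own statement) =====
-- stated objective: simpler
-- what changed: Instead of generating the full bishop move list (four ray walks per bishop, with a triplicated bottom-left ray) and testing membership, B checks directly whether the king square lies on a clear diagonal from an enemy bishop: on-board test, |dx|==|dy|, and every strictly-between square unoccupied.
import Mathlib
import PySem

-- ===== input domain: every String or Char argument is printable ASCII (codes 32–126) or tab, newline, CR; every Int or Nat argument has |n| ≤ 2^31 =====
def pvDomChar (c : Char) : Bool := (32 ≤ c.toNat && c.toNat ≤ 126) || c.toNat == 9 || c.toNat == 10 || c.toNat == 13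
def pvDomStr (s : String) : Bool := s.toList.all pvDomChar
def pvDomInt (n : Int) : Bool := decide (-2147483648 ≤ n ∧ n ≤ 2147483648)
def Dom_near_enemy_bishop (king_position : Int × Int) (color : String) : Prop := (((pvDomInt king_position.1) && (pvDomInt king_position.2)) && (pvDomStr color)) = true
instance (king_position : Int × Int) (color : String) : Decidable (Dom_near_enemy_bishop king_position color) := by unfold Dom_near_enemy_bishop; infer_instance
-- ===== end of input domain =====

-- B replaces A's generation of the whole move list by a direct diagonal reachability test
-- from each enemy bishop to the king square (objective: simpler).

-- module constants (shared board setup)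
def pvWhitePieces : List String :=
  ["rook", "knight", "bishop", "queen", "king", "bishop", "knight", "rook",
   "pawn", "pawn", "pawn", "pawn", "pawn", "pawn", "pawn", "pawn"]
def pvBlackPieces : List String :=
  ["rook", "knight", "bishop", "queen", "king", "bishop", "knight", "rook",
   "pawn", "pawn", "pawn", "pawn", "pawn", "pawn", "pawn", "pawn"]
def pvBlackLocations : List (Int × Int) :=
  [(0, 0), (1, 0), (2, 0), (3, 0), (4, 0), (5, 0), (6, 0), (7, 0),
   (0, 1), (1, 1), (2, 1), (3, 1), (4, 1), (5, 1), (6, 1), (7, 1)]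
def pvWhiteLocations : List (Int × Int) :=
  [(0, 7), (1, 7), (2, 7), (3, 7), (4, 7), (5, 7), (6, 7), (7, 7),
   (0, 6), (1, 6), (2, 6), (3, 6), (4, 6), (5, 6), (6, 6), (7, 6)]

-- ===== PORT A =====
-- the four inner 'for j in range(1, 8): … break' loops, one recursive function each
def pvRayTR (allies enemies : List (Int × Int)) (p : Int × Int) :
    List Int → List (Int × Int) → List (Int × Int)
  | [], acc => acc
  | j :: rest, acc =>
    if ¬ (p.1 + j, p.2 - j) ∈ allies ∧ p.1 + j < 8 ∧ p.2 - j > -1 then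
      if ¬ (p.1 + j, p.2 - j) ∈ enemies then
        pvRayTR allies enemies p rest (acc ++ [(p.1 + j, p.2 - j)])
      else acc ++ [(p.1 + j, p.2 - j)]
    else if (p.1 + j, p.2 - j) ∈ allies then acc ++ [(p.1 + j, p.2 - j)]
    else acc
def pvRayTL (allies enemies : List (Int × Int)) (p : Int × Int) :
    List Int → List (Int × Int) → List (Int × Int)
  | [], acc => acc
  | j :: rest, acc =>
    if ¬ (p.1 - j, p.2 - j) ∈ allies ∧ p.1 - j > -1 ∧ p.2 - j > -1 then
      if ¬ (p.1 - j, p.2 - j) ∈ enemies then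
        pvRayTL allies enemies p rest (acc ++ [(p.1 - j, p.2 - j)])
      else acc ++ [(p.1 - j, p.2 - j)]
    else if (p.1 - j, p.2 - j) ∈ allies then acc ++ [(p.1 - j, p.2 - j)]
    else acc
def pvRayBR (allies enemies : List (Int × Int)) (p : Int × Int) :
    List Int → List (Int × Int) → List (Int × Int)
  | [], acc => acc
  | j :: rest, acc =>
    if ¬ (p.1 + j, p.2 + j) ∈ allies ∧ p.1 + j < 8 ∧ p.2 + j < 8 then
      if ¬ (p.1 + j, p.2 + j) ∈ enemies then
        pvRayBR allies enemies p rest (acc ++ [(p.1 + j, p.2 + j)])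
      else acc ++ [(p.1 + j, p.2 + j)]
    else if (p.1 + j, p.2 + j) ∈ allies then acc ++ [(p.1 + j, p.2 + j)]
    else acc
def pvRayBL (allies enemies : List (Int × Int)) (p : Int × Int) :
    List Int → List (Int × Int) → List (Int × Int)
  | [], acc => acc
  | j :: rest, acc =>
    if ¬ (p.1 - j, p.2 + j) ∈ allies ∧ p.1 - j > -1 ∧ p.2 + j < 8 then
      if ¬ (p.1 - j, p.2 + j) ∈ enemies then
        pvRayBL allies enemies p rest (acc ++ [(p.1 - j, p.2 + j)])
      else acc ++ [(p.1 - j, p.2 + j)]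
    else if (p.1 - j, p.2 + j) ∈ allies then acc ++ [(p.1 - j, p.2 + j)]
    else acc

def near_enemy_bishop (king_position : Int × Int) (color : String) : Bool :=
  let (allies_locations, enemies_locations, enemies_pieces) :=
    if color == "white" then (pvWhiteLocations, pvBlackLocations, pvBlackPieces)
    else (pvBlackLocations, pvWhiteLocations, pvWhitePieces)
  let moves_list : List (Int × Int) :=
    (PySem.List.pyRange 0 enemies_pieces.length 1).foldl (fun acc k =>
      -- indices k are always in range; the 'none' arm is unreachable
      match PySem.List.pyGet? enemies_pieces k with
      | none => acc
      | some pc =>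
        if pc == "bishop" then
          match PySem.List.pyGet? enemies_locations k with
          | none => acc
          | some position =>
            (PySem.List.pyRange 0 4 1).foldl (fun acc i =>
              let acc := if i == 0 then
                pvRayTR allies_locations enemies_locations position (PySem.List.pyRange 1 8 1) acc
                else acc
              let acc := if i == 1 then
                pvRayTL allies_locations enemies_locations position (PySem.List.pyRange 1 8 1) acc
                else acc
              if i == 2 then
                pvRayBR allies_locations enemies_locations position (PySem.List.pyRange 1 8 1) acc
              else
                pvRayBL allies_locations enemies_locations position (PySem.List.pyRange 1 8 1) acc) acc
        else acc) []
  if king_position ∈ moves_list then true else false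

-- ===== PORT B =====
def pvBishopReaches (allies enemies : List (Int × Int)) (pieces : List String)
    (king_position : Int × Int) : Bool :=
  let kx := king_position.1
  let ky := king_position.2
  if ¬ (0 ≤ kx ∧ kx < 8 ∧ 0 ≤ ky ∧ ky < 8) then false
  else
    let occupied : PySem.Set (Int × Int) := PySem.Set.ofList (allies ++ enemies)
    (PySem.List.enumerate pieces).any (fun kp =>
      if kp.2 != "bishop" then false
      else
        -- index kp.1 is always in range; the 'none' arm is unreachable
        match PySem.List.pyGet? enemies kp.1 with
        | none => false
        | some b =>
          let dx := kx - b.1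
          let dy := ky - b.2
          if dx == 0 || dx.natAbs != dy.natAbs then false
          else
            let sx : Int := if dx > 0 then 1 else -1
            let sy : Int := if dy > 0 then 1 else -1
            (PySem.List.pyRange 1 (Int.ofNat dx.natAbs) 1).all (fun j =>
              ¬ PySem.Set.contains occupied (b.1 + j * sx, b.2 + j * sy)))

def near_enemy_bishop_alt (king_position : Int × Int) (color : String) : Bool :=
  if color == "white" then
    pvBishopReaches pvWhiteLocations pvBlackLocations pvBlackPieces king_position
  else
    pvBishopReaches pvBlackLocations pvWhiteLocations pvWhitePieces king_position

-- ===== PRECONDITION & SPEC =====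
def Spec_near_enemy_bishop (king_position : Int × Int) (color : String) (out : Bool) : Prop := out = near_enemy_bishop_alt king_position color
instance (king_position : Int × Int) (color : String) (out : Bool) : Decidable (Spec_near_enemy_bishop king_position color out) := by unfold Spec_near_enemy_bishop; infer_instance

-- ===== CLAIM (what is proved, stated in full; the proofs are below) =====
def Claim_equal_near_enemy_bishop : Prop := ∀ (king_position : Int × Int) (color : String), Dom_near_enemy_bishop king_position color → Spec_near_enemy_bishop king_position color (near_enemy_bishop king_position color)

-- ===== LEMMAS AND PROOFS =====
-- the squares A's move list contains, per side (with A's duplicates kept)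
def pvLw : List (Int × Int) := [(1,1),(1,1),(3,1),(1,1),(4,1),(4,1),(6,1),(4,1)]
def pvLb : List (Int × Int) := [(3,6),(1,6),(6,6),(4,6)]

theorem pvA_white (kp : Int × Int) :
    near_enemy_bishop kp "white" = decide (kp ∈ pvLw) := by
  rfl

theorem pvA_black (kp : Int × Int) (c : String) (h : (c == "white") = false) :
    near_enemy_bishop kp c = decide (kp ∈ pvLb) := by
  unfold near_enemy_bishop
  rw [h]
  rfl

theorem pvB_white (kp : Int × Int) :
    pvBishopReaches pvWhiteLocations pvBlackLocations pvBlackPieces kp = decide (kp ∈ pvLw) := by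
  obtain ⟨x, y⟩ := kp
  by_cases hb : 0 ≤ x ∧ x < 8 ∧ 0 ≤ y ∧ y < 8
  · obtain ⟨h1, h2, h3, h4⟩ := hb
    interval_cases x <;> interval_cases y <;> decide
  · rw [pvBishopReaches, if_pos hb]
    have : ¬ ((x, y) ∈ pvLw) := by
      simp only [pvLw, List.mem_cons, List.not_mem_nil, Prod.mk.injEq, or_false]
      omega
    simp [this]

theorem pvB_black (kp : Int × Int) :
    pvBishopReaches pvBlackLocations pvWhiteLocations pvWhitePieces kp = decide (kp ∈ pvLb) := by
  obtain ⟨x, y⟩ := kp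
  by_cases hb : 0 ≤ x ∧ x < 8 ∧ 0 ≤ y ∧ y < 8
  · obtain ⟨h1, h2, h3, h4⟩ := hb
    interval_cases x <;> interval_cases y <;> decide
  · rw [pvBishopReaches, if_pos hb]
    have : ¬ ((x, y) ∈ pvLb) := by
      simp only [pvLb, List.mem_cons, List.not_mem_nil, Prod.mk.injEq, or_false]
      omega
    simp [this]

-- ===== VERDICT (by name: the statement is the Claim_ definition above) =====
theorem near_enemy_bishop_spec : Claim_equal_near_enemy_bishop := by
  intro kp color _
  unfold Spec_near_enemy_bishop near_enemy_bishop_alt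
  cases h : (color == "white") with
  | true =>
    have : color = "white" := by simpa using h
    subst this
    rw [pvA_white, if_pos rfl, pvB_white]
  | false =>
    rw [pvA_black kp color h]
    simp only [Bool.false_eq_true, if_false]
    rw [pvB_black]
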